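-- pv_equiv track=rewrite | github.com/soliashuptar/web_map_1 | PycharmProjects/ex1/characters_info_ (1).py | column_extend
-- ===== SOURCE A (Python) =====
-- def column_extend(column):
--     """
--     list -> list
--
--     Returns the extended column with sorted vowels without duplication.
--     """
--     vowels = ["a", "e", "i", "o", "u", "A", "E", "I", "O", "U"]
--
--     lst = []
--     for el in column:
--         el = el.lower()
--         if el in vowels and el.isalpha():
--             lst.append(el)
--
--     lst = list(set(lst))
--     lst.sort()
--
--     return lst
-- ===== SOURCE B (Python) =====
-- def column_extend(column):
--     """
--     list -> list
--
--     Returns the extended column with sorted vowels without duplication.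
--     """
--     lowered = set()
--     for el in column:
--         lowered.add(el.lower())
--     return [v for v in ["a", "e", "i", "o", "u"] if v in lowered]
-- ===== Notes on version B (the rewrite author's own statement) =====
-- stated objective: alternative
-- what changed: Instead of scanning the column for vowel matches and then deduplicating and sorting the hits, B builds one set of lowercased elements and probes the fixed alphabetical vowel vocabulary against it, so no filter-by-vowel pass, no dedup and no sort are needed.
import Mathlib
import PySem

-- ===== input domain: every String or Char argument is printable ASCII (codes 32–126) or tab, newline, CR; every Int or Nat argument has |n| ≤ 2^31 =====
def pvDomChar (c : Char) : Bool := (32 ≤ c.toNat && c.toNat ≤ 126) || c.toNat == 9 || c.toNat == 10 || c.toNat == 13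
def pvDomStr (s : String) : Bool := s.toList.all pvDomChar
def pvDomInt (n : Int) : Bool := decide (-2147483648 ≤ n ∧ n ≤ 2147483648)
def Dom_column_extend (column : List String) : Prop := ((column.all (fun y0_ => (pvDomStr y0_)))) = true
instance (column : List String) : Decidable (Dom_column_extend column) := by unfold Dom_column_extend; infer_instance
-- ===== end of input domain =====

-- B replaces A's scan-filter-dedup-sort by one set of lowercased elements probed against the fixed alphabetical vowel vocabulary (alternative decomposition, same cost class).


-- ===== PORT A =====
-- 'el in vowels' on the lowered element, then isalpha; collected hits deduplicated via set() and sorted (list(set(..)).sort() is order-independent after the sort).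
def column_extend (column : List String) : List String :=
  let vowels : List String := ["a", "e", "i", "o", "u", "A", "E", "I", "O", "U"]
  let lst : List String := column.foldl (fun lst el =>
    let el2 := PySem.Str.lower el
    if vowels.contains el2 && PySem.Str.strIsalpha el2 then lst ++ [el2] else lst) []
  PySem.List.sorted (PySem.Set.ofList lst) (fun x => x)

-- ===== PORT B =====
def column_extend_alt (column : List String) : List String :=
  let lowered : PySem.Set String :=
    column.foldl (fun s el => PySem.Set.add s (PySem.Str.lower el)) PySem.Set.empty
  (["a", "e", "i", "o", "u"] : List String).filter (fun v => PySem.Set.contains lowered v)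

-- ===== PRECONDITION & SPEC =====
def Spec_column_extend (column : List String) (out : List String) : Prop := out = column_extend_alt column
instance (column : List String) (out : List String) : Decidable (Spec_column_extend column out) := by unfold Spec_column_extend; infer_instance

-- ===== CLAIM (what is proved, stated in full; the proofs are below) =====
def Claim_equal_column_extend : Prop := ∀ (column : List String), Dom_column_extend column → Spec_column_extend column (column_extend column)

-- ===== LEMMAS AND PROOFS =====

-- a lowered character is never an uppercase letter
theorem pv_lowerChar_not_upper (c : Char) : PySem.Chars.isupper (PySem.Chars.lowerChar c) = false := by
  unfold PySem.Chars.lowerChar PySem.Chars.isupper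
  by_cases hc : (decide ('A' ≤ c) && decide (c ≤ 'Z')) = true
  · simp only [hc, if_true]
    have h1 : 'A' ≤ c := of_decide_eq_true ((Bool.and_eq_true _ _).mp hc).1
    simp only [Char.le_def, UInt32.le_iff_toNat_le] at h1
    have eA : 'A'.val.toNat = 65 := by decide
    have eZ : 'Z'.val.toNat = 90 := by decide
    have hval : (Char.ofNat (c.toNat + 32)).toNat = c.toNat + 32 := by
      rw [Char.toNat_ofNat]
      have h2 : c ≤ 'Z' := of_decide_eq_true ((Bool.and_eq_true _ _).mp hc).2
      simp only [Char.le_def, UInt32.le_iff_toNat_le] at h2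
      have hv : (c.toNat + 32).isValidChar := by
        left
        change c.val.toNat + 32 < 55296
        omega
      simp [hv]
    simp only [Bool.and_eq_false_iff, decide_eq_false_iff_not, Char.le_def,
      UInt32.le_iff_toNat_le]
    right
    intro hZ
    change (Char.ofNat (c.toNat + 32)).val.toNat ≤ 'Z'.val.toNat at hZ
    change (Char.ofNat (c.toNat + 32)).val.toNat = c.val.toNat + 32 at hval
    omega
  · simp [hc]

-- a lowered string is never one of the five uppercase vowels
theorem pv_lower_ne_upper (s : String) (u : Char)
    (hu : PySem.Chars.isupper u = true) : PySem.Str.lower s ≠ String.ofList [u] := by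
  intro h
  have hl : PySem.Chars.lower s.toList = [u] := by
    rw [← PySem.Str.toList_lower, h]
    simp
  have : u ∈ PySem.Chars.lower s.toList := by rw [hl]; exact List.mem_singleton.mpr rfl
  unfold PySem.Chars.lower at this
  obtain ⟨c, _, hc⟩ := List.mem_map.mp this
  rw [← hc] at hu
  rw [pv_lowerChar_not_upper] at hu
  exact Bool.false_ne_true hu

-- the five lowercase vowels are strictly increasing in Python's string order
theorem pv_V5_pairwise : (["a", "e", "i", "o", "u"] : List String).Pairwise (· < ·) := by
  refine List.Pairwise.cons ?_ (List.Pairwise.cons ?_ (List.Pairwise.cons ?_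
    (List.Pairwise.cons ?_ (List.Pairwise.cons ?_ List.Pairwise.nil)))) <;>
    (intro y hy; fin_cases hy) <;> (rw [String.lt_iff_toList_lt]; decide)

-- A's kept-hit predicate agrees with plain 5-vowel membership on lowered strings
theorem pv_pred_eq (x : String) :
    ((["a", "e", "i", "o", "u", "A", "E", "I", "O", "U"] : List String).contains (PySem.Str.lower x)
      && PySem.Str.strIsalpha (PySem.Str.lower x))
    = (["a", "e", "i", "o", "u"] : List String).contains (PySem.Str.lower x) := by
  by_cases h : PySem.Str.lower x ∈ (["a", "e", "i", "o", "u"] : List String)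
  · simp only [List.mem_cons, List.not_mem_nil, or_false] at h
    rcases h with h | h | h | h | h <;> (rw [h]; decide)
  · have hA : PySem.Str.lower x ≠ "A" := pv_lower_ne_upper x 'A' (by decide)
    have hE : PySem.Str.lower x ≠ "E" := pv_lower_ne_upper x 'E' (by decide)
    have hI : PySem.Str.lower x ≠ "I" := pv_lower_ne_upper x 'I' (by decide)
    have hO : PySem.Str.lower x ≠ "O" := pv_lower_ne_upper x 'O' (by decide)
    have hU : PySem.Str.lower x ≠ "U" := pv_lower_ne_upper x 'U' (by decide)
    simp only [List.mem_cons, List.not_mem_nil, or_false, not_or] at h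
    obtain ⟨ha, he, hi, ho, hu⟩ := h
    simp [List.contains_eq_mem, ha, he, hi, ho, hu, hA, hE, hI, hO, hU]

-- ===== VERDICT (by name: the statement is the Claim_ definition above) =====
theorem column_extend_spec : Claim_equal_column_extend := by
  intro column _
  unfold Spec_column_extend column_extend column_extend_alt
  simp only []
  -- both folds are folds over the lowered column
  rw [show (fun (lst : List String) el =>
        let el2 := PySem.Str.lower el
        if (["a", "e", "i", "o", "u", "A", "E", "I", "O", "U"] : List String).contains el2
            && PySem.Str.strIsalpha el2 then lst ++ [el2] else lst)
      = (fun (lst : List String) el =>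
        if ((["a", "e", "i", "o", "u", "A", "E", "I", "O", "U"] : List String).contains (PySem.Str.lower el)
            && PySem.Str.strIsalpha (PySem.Str.lower el)) then lst ++ [PySem.Str.lower el] else lst) from rfl]
  rw [PySem.List.foldl_append_if
        (fun el => (["a", "e", "i", "o", "u", "A", "E", "I", "O", "U"] : List String).contains (PySem.Str.lower el)
            && PySem.Str.strIsalpha (PySem.Str.lower el))
        PySem.Str.lower column []]
  rw [List.nil_append,
    show (fun el => (["a", "e", "i", "o", "u", "A", "E", "I", "O", "U"] : List String).contains (PySem.Str.lower el)
            && PySem.Str.strIsalpha (PySem.Str.lower el))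
      = ((fun e => (["a", "e", "i", "o", "u", "A", "E", "I", "O", "U"] : List String).contains e
            && PySem.Str.strIsalpha e) ∘ PySem.Str.lower) from rfl,
    ← List.filter_map]
  rw [List.filter_congr (fun x hx => by
    obtain ⟨y, _, rfl⟩ := List.mem_map.mp hx
    exact pv_pred_eq y)]
  have hB : (column.foldl (fun s el => PySem.Set.add s (PySem.Str.lower el)) PySem.Set.empty)
      = PySem.Set.ofList (column.map PySem.Str.lower) := by
    rw [PySem.Set.ofList_eq_foldl, List.foldl_map]; rfl
  rw [hB]
  apply PySem.List.sorted_eq_of_perm_of_pairwise_lt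
  · apply (List.perm_ext_iff_of_nodup ?_ ?_).mpr
    · intro a
      simp only [List.mem_filter, PySem.Set.mem_ofList, List.mem_map,
        PySem.Set.contains, List.contains_eq_mem, decide_eq_true_eq]
      constructor
      · rintro ⟨h5, hL⟩; exact ⟨hL, h5⟩
      · rintro ⟨hL, h5⟩; exact ⟨h5, hL⟩
    · exact List.Nodup.filter _ (by decide)
    · exact PySem.Set.nodup_ofList _
  · exact List.Pairwise.sublist List.filter_sublist pv_V5_pairwise
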